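-- pv_equiv track=rewrite | github.com/REportPad/Algorithm | Euler/prime_power_triples.py | prime_power_triples
-- ===== SOURCE A (Python) =====
-- def prime_power_triples(N,primes,L):
--   set0=set()
--   for a in range(0,L):
--     A=primes[a]**2
--     for b in range(0,L):
--       B=primes[b]**3
--       for c in range(0,L):
--         x = A +B +primes[c]**4
--         if x >= N:
--           break
--         set0.add(x)
--   return len(set0)
-- ===== SOURCE B (Python) =====
-- def prime_power_triples(N, primes, L):
--     # Phase 1: deduplicated set of partial sums p^2 + q^3; Phase 2: combine with 4th powers.
--     s2 = {primes[a] ** 2 + primes[b] ** 3 for a in range(L) for b in range(L)}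
--     fours = [primes[c] ** 4 for c in range(L)]
--     out = set()
--     for s in s2:
--         for f in fours:
--             x = s + f
--             if x >= N:
--                 break
--             out.add(x)
--     return len(out)
-- ===== Notes on version B (the rewrite author's own statement) =====
-- stated objective: alternative
-- what changed: Replaces the single triple-nested loop by a two-phase traversal: first build a deduplicated set of partial sums p^2+q^3, then a separate pass combines each distinct partial sum with the precomputed fourth powers (keeping the strict x<N early break).
import Mathlib
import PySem

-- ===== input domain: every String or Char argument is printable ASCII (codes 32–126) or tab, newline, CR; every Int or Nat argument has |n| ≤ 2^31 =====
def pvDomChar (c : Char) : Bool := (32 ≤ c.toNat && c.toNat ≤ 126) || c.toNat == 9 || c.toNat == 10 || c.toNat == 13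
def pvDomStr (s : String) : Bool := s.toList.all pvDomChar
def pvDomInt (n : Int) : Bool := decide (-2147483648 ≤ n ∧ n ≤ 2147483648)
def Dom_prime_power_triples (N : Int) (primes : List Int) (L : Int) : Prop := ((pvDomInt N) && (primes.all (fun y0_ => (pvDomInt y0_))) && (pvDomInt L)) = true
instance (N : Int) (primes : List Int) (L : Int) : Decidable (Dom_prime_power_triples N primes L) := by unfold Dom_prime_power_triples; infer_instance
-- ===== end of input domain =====

-- B replaces A's triple-nested loop by a two-phase traversal (deduplicated p^2+q^3 partial sums, then combine with 4th powers); same results, proved equal.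


-- ===== PORT A =====
-- innermost 'for c in range(0,L): x = A+B+primes[c]**4; if x >= N: break; set0.add(x)'
def pptA_c (N s : Int) (primes : List Int) : List Int → PySem.Set Int → PySem.Set Int
  | [], acc => acc
  | c :: cs, acc =>
    let x := s + ((PySem.List.pyGet? primes c).getD 0) ^ 4
    if N ≤ x then acc else pptA_c N s primes cs (PySem.Set.add acc x)

def prime_power_triples (N : Int) (primes : List Int) (L : Int) : Int :=
  let rng := PySem.List.pyRange 0 L 1
  let set0 : PySem.Set Int :=
    rng.foldl (fun acc a =>
      let A2 := ((PySem.List.pyGet? primes a).getD 0) ^ 2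
      rng.foldl (fun acc b =>
        let B3 := ((PySem.List.pyGet? primes b).getD 0) ^ 3
        pptA_c N (A2 + B3) primes rng acc) acc) PySem.Set.empty
  PySem.List.len set0

-- ===== PORT B =====
-- inner 'for f in fours: x = s + f; if x >= N: break; out.add(x)'
def pptB_f (N s : Int) : List Int → PySem.Set Int → PySem.Set Int
  | [], acc => acc
  | f :: fs, acc =>
    let x := s + f
    if N ≤ x then acc else pptB_f N s fs (PySem.Set.add acc x)

def prime_power_triples_alt (N : Int) (primes : List Int) (L : Int) : Int :=
  let rng := PySem.List.pyRange 0 L 1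
  let s2 : PySem.Set Int :=
    rng.foldl (fun acc a =>
      rng.foldl (fun acc b =>
        PySem.Set.add acc (((PySem.List.pyGet? primes a).getD 0) ^ 2 + ((PySem.List.pyGet? primes b).getD 0) ^ 3)) acc) PySem.Set.empty
  let fours := rng.map (fun c => ((PySem.List.pyGet? primes c).getD 0) ^ 4)
  let out : PySem.Set Int := s2.foldl (fun acc s => pptB_f N s fours acc) PySem.Set.empty
  PySem.List.len out

-- ===== PRECONDITION & SPEC =====
-- Pre_ excludes exactly the inputs where the Python A raises IndexError: L > len(primes) with L > 0.
def Pre_prime_power_triples (N : Int) (primes : List Int) (L : Int) : Prop :=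
  L ≤ (primes.length : Int) ∨ L ≤ 0
instance (N : Int) (primes : List Int) (L : Int) : Decidable (Pre_prime_power_triples N primes L) := by unfold Pre_prime_power_triples; infer_instance
def pvWitness_prime_power_triples : Int × List Int × Int := (100, [2, 3, 5], 3)

def Spec_prime_power_triples (N : Int) (primes : List Int) (L : Int) (out : Int) : Prop := out = prime_power_triples_alt N primes L
instance (N : Int) (primes : List Int) (L : Int) (out : Int) : Decidable (Spec_prime_power_triples N primes L out) := by unfold Spec_prime_power_triples; infer_instance

-- ===== CLAIM (what is proved, stated in full; the proofs are below) =====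
def Claim_equal_prime_power_triples : Prop := ∀ (N : Int) (primes : List Int) (L : Int), Dom_prime_power_triples N primes L → Pre_prime_power_triples N primes L → Spec_prime_power_triples N primes L (prime_power_triples N primes L)

-- ===== LEMMAS AND PROOFS =====

-- the values the break-loop adds for a given partial sum s
def brkElems (N s : Int) : List Int → List Int
  | [] => []
  | f :: fs => let x := s + f; if N ≤ x then [] else x :: brkElems N s fs

theorem pptA_eq_pptB (N s : Int) (primes : List Int) (cs : List Int) (acc : PySem.Set Int) :
    pptA_c N s primes cs acc
      = pptB_f N s (cs.map (fun c => ((PySem.List.pyGet? primes c).getD 0) ^ 4)) acc := by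
  induction cs generalizing acc with
  | nil => rfl
  | cons c cs ih => simp only [pptA_c, pptB_f, List.map_cons]; split <;> simp [ih]

theorem mem_pptB_f (N s : Int) (fs : List Int) (acc : PySem.Set Int) (y : Int) :
    y ∈ pptB_f N s fs acc ↔ y ∈ acc ∨ y ∈ brkElems N s fs := by
  induction fs generalizing acc with
  | nil => simp [pptB_f, brkElems]
  | cons f fs ih =>
    simp only [pptB_f, brkElems]
    split
    · simp
    · rw [ih]; simp [PySem.Set.mem_add]; tauto

theorem nodup_pptB_f (N s : Int) (fs : List Int) (acc : PySem.Set Int) (h : acc.Nodup) :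
    (pptB_f N s fs acc).Nodup := by
  induction fs generalizing acc with
  | nil => exact h
  | cons f fs ih =>
    simp only [pptB_f]
    split
    · exact h
    · exact ih _ (PySem.Set.nodup_add _ _ h)

theorem mem_foldl_pptB (N : Int) (fours : List Int) (l : List Int) (acc : PySem.Set Int) (y : Int) :
    y ∈ l.foldl (fun acc s => pptB_f N s fours acc) acc
      ↔ y ∈ acc ∨ ∃ s ∈ l, y ∈ brkElems N s fours := by
  induction l generalizing acc with
  | nil => simp
  | cons s l ih =>
    simp only [List.foldl_cons, ih, mem_pptB_f, List.mem_cons]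
    constructor
    · rintro ((h | h) | ⟨t, ht, hy⟩)
      · exact Or.inl h
      · exact Or.inr ⟨s, Or.inl rfl, h⟩
      · exact Or.inr ⟨t, Or.inr ht, hy⟩
    · rintro (h | ⟨t, (rfl | ht), hy⟩)
      · exact Or.inl (Or.inl h)
      · exact Or.inl (Or.inr hy)
      · exact Or.inr ⟨t, ht, hy⟩

theorem nodup_foldl_pptB (N : Int) (fours : List Int) (l : List Int) (acc : PySem.Set Int) (h : acc.Nodup) :
    (l.foldl (fun acc s => pptB_f N s fours acc) acc).Nodup := by
  induction l generalizing acc with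
  | nil => exact h
  | cons s l ih => exact ih _ (nodup_pptB_f N s fours acc h)

theorem mem_foldl_add (l : List Int) (acc : PySem.Set Int) (y : Int) :
    y ∈ l.foldl PySem.Set.add acc ↔ y ∈ acc ∨ y ∈ l := by
  induction l generalizing acc with
  | nil => simp
  | cons x l ih => rw [List.foldl_cons, ih]; simp [PySem.Set.mem_add]; tauto

theorem nodup_foldl_add (l : List Int) (acc : PySem.Set Int) (h : acc.Nodup) :
    (l.foldl PySem.Set.add acc).Nodup := by
  induction l generalizing acc with
  | nil => exact h
  | cons x l ih => exact ih _ (PySem.Set.nodup_add _ _ h)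

-- ===== VERDICT (by name: the statement is the Claim_ definition above) =====
theorem prime_power_triples_spec : Claim_equal_prime_power_triples := by
  intro N primes L _ _
  unfold Spec_prime_power_triples prime_power_triples prime_power_triples_alt
  simp only []
  set rng := PySem.List.pyRange 0 L 1 with hrng
  set sq : Int → Int := fun a => ((PySem.List.pyGet? primes a).getD 0) ^ 2 with hsq
  set cu : Int → Int := fun b => ((PySem.List.pyGet? primes b).getD 0) ^ 3 with hcu
  set fours := rng.map (fun c => ((PySem.List.pyGet? primes c).getD 0) ^ 4) with hfours
  -- A's set, rewritten through pptA_eq_pptB, as a fold of pptB_f over all pairs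
  have hA : ∀ y : Int,
      (y ∈ rng.foldl (fun acc a =>
          rng.foldl (fun acc b => pptA_c N (sq a + cu b) primes rng acc) acc) PySem.Set.empty)
        ↔ ∃ a ∈ rng, ∃ b ∈ rng, y ∈ brkElems N (sq a + cu b) fours := by
    intro y
    have step : ∀ (l : List Int) (acc : PySem.Set Int),
        y ∈ l.foldl (fun acc a =>
            rng.foldl (fun acc b => pptA_c N (sq a + cu b) primes rng acc) acc) acc
          ↔ y ∈ acc ∨ ∃ a ∈ l, ∃ b ∈ rng, y ∈ brkElems N (sq a + cu b) fours := by
      intro l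
      induction l with
      | nil => simp
      | cons a l ih =>
        intro acc
        simp only [List.foldl_cons, ih]
        have : ∀ acc : PySem.Set Int,
            rng.foldl (fun acc b => pptA_c N (sq a + cu b) primes rng acc) acc
              = (rng.map (fun b => sq a + cu b)).foldl (fun acc s => pptB_f N s fours acc) acc := by
          intro acc
          rw [List.foldl_map]
          congr 1
          funext acc b
          rw [pptA_eq_pptB, hfours]
        rw [this, mem_foldl_pptB]
        simp only [List.mem_map, List.mem_cons]
        constructor
        · rintro ((h | ⟨s, ⟨b, hb, rfl⟩, hy⟩) | ⟨t, ht, b, hb, hy⟩)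
          · exact Or.inl h
          · exact Or.inr ⟨a, Or.inl rfl, b, hb, hy⟩
          · exact Or.inr ⟨t, Or.inr ht, b, hb, hy⟩
        · rintro (h | ⟨t, (rfl | ht), b, hb, hy⟩)
          · exact Or.inl (Or.inl h)
          · exact Or.inl (Or.inr ⟨sq t + cu b, ⟨b, hb, rfl⟩, hy⟩)
          · exact Or.inr ⟨t, ht, b, hb, hy⟩
    rw [step]; simp [PySem.Set.empty]
  -- B's s2: membership is exactly the pair sums
  have hS2 : ∀ y : Int,
      (y ∈ rng.foldl (fun acc a =>
          rng.foldl (fun acc b => PySem.Set.add acc (sq a + cu b)) acc) PySem.Set.empty)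
        ↔ ∃ a ∈ rng, ∃ b ∈ rng, y = sq a + cu b := by
    intro y
    have step : ∀ (l : List Int) (acc : PySem.Set Int),
        y ∈ l.foldl (fun acc a => rng.foldl (fun acc b => PySem.Set.add acc (sq a + cu b)) acc) acc
          ↔ y ∈ acc ∨ ∃ a ∈ l, ∃ b ∈ rng, y = sq a + cu b := by
      intro l
      induction l with
      | nil => simp
      | cons a l ih =>
        intro acc
        simp only [List.foldl_cons, ih]
        have : rng.foldl (fun acc b => PySem.Set.add acc (sq a + cu b)) acc
            = (rng.map (fun b => sq a + cu b)).foldl PySem.Set.add acc := by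
          rw [List.foldl_map]
        rw [this, mem_foldl_add]
        simp only [List.mem_map, List.mem_cons]
        constructor
        · rintro ((h | ⟨b, hb, rfl⟩) | ⟨t, ht, b, hb, hy⟩)
          · exact Or.inl h
          · exact Or.inr ⟨a, Or.inl rfl, b, hb, rfl⟩
          · exact Or.inr ⟨t, Or.inr ht, b, hb, hy⟩
        · rintro (h | ⟨t, (rfl | ht), b, hb, hy⟩)
          · exact Or.inl (Or.inl h)
          · exact Or.inl (Or.inr ⟨b, hb, hy.symm⟩)
          · exact Or.inr ⟨t, ht, b, hb, hy⟩
    rw [step]; simp [PySem.Set.empty]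
  -- nodup of both final sets
  have hAnd : (rng.foldl (fun acc a =>
      rng.foldl (fun acc b => pptA_c N (sq a + cu b) primes rng acc) acc) PySem.Set.empty).Nodup := by
    have step : ∀ (l : List Int) (acc : PySem.Set Int), acc.Nodup →
        (l.foldl (fun acc a =>
            rng.foldl (fun acc b => pptA_c N (sq a + cu b) primes rng acc) acc) acc).Nodup := by
      intro l
      induction l with
      | nil => exact fun acc h => h
      | cons a l ih =>
        intro acc hacc
        simp only [List.foldl_cons]
        apply ih
        have : rng.foldl (fun acc b => pptA_c N (sq a + cu b) primes rng acc) acc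
            = (rng.map (fun b => sq a + cu b)).foldl (fun acc s => pptB_f N s fours acc) acc := by
          rw [List.foldl_map]
          congr 1
          funext acc b
          rw [pptA_eq_pptB, hfours]
        rw [this]
        exact nodup_foldl_pptB _ _ _ _ hacc
    exact step rng PySem.Set.empty (by simp [PySem.Set.empty])
  have hS2nd : (rng.foldl (fun acc a =>
      rng.foldl (fun acc b => PySem.Set.add acc (sq a + cu b)) acc) PySem.Set.empty).Nodup := by
    have step : ∀ (l : List Int) (acc : PySem.Set Int), acc.Nodup →
        (l.foldl (fun acc a => rng.foldl (fun acc b => PySem.Set.add acc (sq a + cu b)) acc) acc).Nodup := by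
      intro l
      induction l with
      | nil => exact fun acc h => h
      | cons a l ih =>
        intro acc hacc
        simp only [List.foldl_cons]
        apply ih
        rw [show rng.foldl (fun acc b => PySem.Set.add acc (sq a + cu b)) acc
            = (rng.map (fun b => sq a + cu b)).foldl PySem.Set.add acc from by rw [List.foldl_map]]
        exact nodup_foldl_add _ _ hacc
    exact step rng PySem.Set.empty (by simp [PySem.Set.empty])
  -- B's out: same membership predicate as A's set
  have hBnd : ((rng.foldl (fun acc a =>
      rng.foldl (fun acc b => PySem.Set.add acc (sq a + cu b)) acc) PySem.Set.empty).foldl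
        (fun acc s => pptB_f N s fours acc) PySem.Set.empty).Nodup :=
    nodup_foldl_pptB _ _ _ _ (by simp [PySem.Set.empty])
  have hB : ∀ y : Int,
      (y ∈ (rng.foldl (fun acc a =>
          rng.foldl (fun acc b => PySem.Set.add acc (sq a + cu b)) acc) PySem.Set.empty).foldl
            (fun acc s => pptB_f N s fours acc) PySem.Set.empty)
        ↔ ∃ a ∈ rng, ∃ b ∈ rng, y ∈ brkElems N (sq a + cu b) fours := by
    intro y
    rw [mem_foldl_pptB]
    simp only [PySem.Set.empty]
    constructor
    · rintro (h | ⟨s, hs, hy⟩)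
      · simp at h
      · obtain ⟨a, ha, b, hb, rfl⟩ := (hS2 s).mp hs
        exact ⟨a, ha, b, hb, hy⟩
    · rintro ⟨a, ha, b, hb, hy⟩
      exact Or.inr ⟨sq a + cu b, (hS2 _).mpr ⟨a, ha, b, hb, rfl⟩, hy⟩
  -- same membership + both Nodup ⇒ perm ⇒ equal length
  have hperm := (List.perm_ext_iff_of_nodup hAnd hBnd).mpr (fun y => (hA y).trans (hB y).symm)
  simp only [PySem.List.len_eq]
  exact congrArg (fun n : Nat => (n : Int)) hperm.length_eq
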